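-- pv_equiv track=rewrite | github.com/John-Popovici/MCYSD-18-escape-room | src/escaperoom/rooms/soc.py | find_right_subnet
-- ===== SOURCE A (Python) =====
-- def find_right_subnet(ip_list:list) -> str :
--     """Find the most used subnet."""
--     ip_dict={}
--     for i in ip_list:
--         if i in ip_dict:
--             ip_dict[i]+=1
--         else:
--             ip_dict.update({i: 1})
--
--     # Remove last part of ip and replace it with subnet
--     sub_dict={}
--     for i, count in ip_dict.items():
--         subnet_ip= i.split(".")
--         subnet_ip.pop()
--         subnet_prefinal= (".").join(subnet_ip)
--         subnet_final= subnet_prefinal + ".0/24"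
--
--         if subnet_final in sub_dict:
--             sub_dict[subnet_final]+= count
--         else:
--             sub_dict.update({subnet_final: count})
--
--     # Find most used subnet with .get to find the highest value
--     most_used_subnet= max(sub_dict, key= sub_dict.get)
--
--     return most_used_subnet, sub_dict[most_used_subnet]
-- ===== SOURCE B (Python) =====
-- def find_right_subnet(ip_list: list) -> str:
--     """Find the most used subnet (single aggregating pass, no per-IP table)."""
--     sub_dict = {}
--     for ip in ip_list:
--         key = ".".join(ip.split(".")[:-1]) + ".0/24"
--         sub_dict[key] = sub_dict.get(key, 0) + 1
--     return max(sub_dict.items(), key=lambda kv: kv[1])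
-- ===== Notes on version B (the rewrite author's own statement) =====
-- stated objective: simpler
-- what changed: B drops A's intermediate per-IP frequency table and its second grouping loop: one pass over the list aggregates counts directly per '<a.b.c>.0/24' key, and the answer is a single max over the dict's items instead of a max over keys followed by a lookup.
import Mathlib
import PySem

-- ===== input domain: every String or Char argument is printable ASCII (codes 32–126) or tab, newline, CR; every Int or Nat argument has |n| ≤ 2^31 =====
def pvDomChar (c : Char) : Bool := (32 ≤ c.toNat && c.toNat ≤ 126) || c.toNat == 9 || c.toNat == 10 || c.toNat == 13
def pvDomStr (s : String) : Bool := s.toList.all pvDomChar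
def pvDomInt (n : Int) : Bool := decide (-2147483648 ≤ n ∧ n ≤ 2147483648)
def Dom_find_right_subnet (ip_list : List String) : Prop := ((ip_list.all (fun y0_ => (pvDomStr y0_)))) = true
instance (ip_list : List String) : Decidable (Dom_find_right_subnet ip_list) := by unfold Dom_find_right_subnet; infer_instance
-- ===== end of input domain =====

-- B replaces A's two-table pass (per-IP counter, then per-subnet aggregation) by one direct
-- aggregating pass over the list and a max over the items; objective: simpler, same cost.

-- ===== PORT A =====
-- '.'.join(i.split('.')[:-1]) + '.0/24' — shared key computation, textually the same in both Pythons
-- (split? is exact for the non-empty separator "."; the `none` branch is unreachable).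
def subnetKey (i : String) : String :=
  let subnet_ip := (PySem.Str.split? i ".").getD []
  let pre := subnet_ip.dropLast          -- subnet_ip.pop() removes the last element
  PySem.Str.join "." pre ++ ".0/24"

def find_right_subnet (ip_list : List String) : String × Int :=
  let ip_dict := ip_list.foldl (fun d i =>
      if d.contains i then d.insert i (d.getD i 0 + 1) else d.insert i 1)
    PySem.Dict.empty
  let sub_dict := ip_dict.items.foldl (fun d p =>
      let subnet_final := subnetKey p.1
      if d.contains subnet_final then d.insert subnet_final (d.getD subnet_final 0 + p.2)
      else d.insert subnet_final p.2)
    PySem.Dict.empty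
  match PySem.List.max? sub_dict.keys (fun k => sub_dict.getD k 0) with
  | some m => (m, sub_dict.getD m 0)
  | none => ("", 0)      -- unreachable under Pre_ (Python: max() raises ValueError)

-- ===== PORT B =====
def find_right_subnet_alt (ip_list : List String) : String × Int :=
  let sub_dict := ip_list.foldl (fun d ip =>
      let key := subnetKey ip
      d.insert key (d.getD key 0 + 1))
    PySem.Dict.empty
  match PySem.List.max? sub_dict.items (fun kv => kv.2) with
  | some p => p
  | none => ("", 0)      -- unreachable under Pre_ (Python: max() raises ValueError)

-- ===== PRECONDITION & SPEC =====
-- On the empty list both Pythons raise ValueError (max of an empty sequence); Pre_ excludes it.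
def Pre_find_right_subnet (ip_list : List String) : Prop := ip_list ≠ []
instance (ip_list : List String) : Decidable (Pre_find_right_subnet ip_list) := by
  unfold Pre_find_right_subnet; infer_instance
def pvWitness_find_right_subnet : List String := ["10.0.0.1", "10.0.0.2", "10.0.1.1"]
def Spec_find_right_subnet (ip_list : List String) (out : String × Int) : Prop := out = find_right_subnet_alt ip_list
instance (ip_list : List String) (out : String × Int) : Decidable (Spec_find_right_subnet ip_list out) := by unfold Spec_find_right_subnet; infer_instance

-- ===== CLAIM (what is proved, stated in full; the proofs are below) =====
def Claim_equal_find_right_subnet : Prop := ∀ (ip_list : List String), Dom_find_right_subnet ip_list → Pre_find_right_subnet ip_list → Spec_find_right_subnet ip_list (find_right_subnet ip_list)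

-- ===== LEMMAS AND PROOFS =====

-- max? over a mapped list is max? under the composed key, mapped.
theorem max?_map_comm {α β κ : Type} [LT κ] [DecidableLT κ] (l : List α) (g : α → β)
    (key : β → κ) :
    PySem.List.max? (l.map g) key = (PySem.List.max? l (fun x => key (g x))).map g := by
  simp only [PySem.List.max?, List.foldl_map]
  suffices h : ∀ acc : Option α,
      (l.foldl (fun acc x =>
        match acc with
        | none => some (g x)
        | some m => if key m < key (g x) then some (g x) else some m) (acc.map g)) =
      (l.foldl (fun acc x =>
        match acc with
        | none => some x
        | some m => if key (g m) < key (g x) then some x else some m) acc).map g by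
    exact h none
  intro acc
  induction l generalizing acc with
  | nil => rfl
  | cons x t ih =>
    simp only [List.foldl_cons]
    have hstep : (match acc.map g with
        | none => some (g x)
        | some m => if key m < key (g x) then some (g x) else some m)
        = (match acc with
        | none => some x
        | some m => if key (g m) < key (g x) then some x else some m).map g := by
      cases acc with
      | none => rfl
      | some m => by_cases h : key (g m) < key (g x) <;> simp [h]
    rw [hstep]; exact ih _

-- getD of a weighted keyed-insert fold: the old value plus the total weight carried at that key.
theorem getD_weighted_fold {κ : Type} [BEq κ] [LawfulBEq κ] [DecidableEq κ]
    (l : List (κ × Int)) (d : PySem.Dict κ Int) (v : κ) :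
    (l.foldl (fun d p => d.insert p.1 (d.getD p.1 0 + p.2)) d).getD v 0
      = d.getD v 0 + ((l.filter (fun p => p.1 == v)).map (·.2)).sum := by
  induction l generalizing d with
  | nil => simp
  | cons p t ih =>
    simp only [List.foldl_cons, ih, List.filter_cons]
    by_cases h : p.1 = v
    · subst h; simp; ring
    · simp [PySem.Dict.getD_insert, h, Ne.symm h]

-- deduplicating before mapping does not change the deduplicated mapped list
theorem ofList_map_ofList {α β : Type} [DecidableEq α] [DecidableEq β] (f : α → β) (xs : List α) :
    PySem.Set.ofList ((PySem.Set.ofList xs).map f) = PySem.Set.ofList (xs.map f) := by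
  induction xs using List.reverseRecOn with
  | nil => rfl
  | append_singleton t x ih =>
    rw [PySem.Set.ofList_append_singleton]
    by_cases h : x ∈ PySem.Set.ofList t
    · rw [PySem.Set.add_of_mem h, ih, List.map_append, List.map_singleton,
        PySem.Set.ofList_append_singleton,
        PySem.Set.add_of_mem]
      rw [PySem.Set.mem_ofList]
      exact List.mem_map_of_mem ((PySem.Set.mem_ofList _ _).1 h)
    · rw [PySem.Set.add_of_not_mem h, List.map_append, List.map_singleton,
        PySem.Set.ofList_append_singleton, ih, List.map_append, List.map_singleton,
        PySem.Set.ofList_append_singleton]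

-- grouping: summing per-distinct-element counts over the elements mapping to v is counting v in the image
theorem sum_counts_eq_count_map {α β : Type} [DecidableEq α] [DecidableEq β]
    (f : α → β) (xs : List α) (v : β) :
    ((((PySem.Set.ofList xs).filter (fun i => f i == v)).map
        (fun i => ((xs.count i : Nat) : Int))).sum)
      = (((xs.map f).count v : Nat) : Int) := by
  have hperm : (PySem.Set.ofList xs).Perm xs.dedup := by
    rw [List.perm_ext_iff_of_nodup (PySem.Set.nodup_ofList xs) xs.nodup_dedup]
    intro a; rw [PySem.Set.mem_ofList, List.mem_dedup]
  have h2 : ((((PySem.Set.ofList xs).filter (fun i => f i == v)).map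
        (fun i => ((xs.count i : Nat) : Int))).sum)
      = (((xs.dedup.filter (fun i => f i == v)).map
        (fun i => ((xs.count i : Nat) : Int))).sum) :=
    List.Perm.sum_eq (List.Perm.map _ (List.Perm.filter _ hperm))
  have h3 : (((xs.dedup.filter (fun i => f i == v)).map
        (fun i => (xs.count i : Nat))).sum)
      = List.countP (fun b => b == v) (xs.map f) := by
    rw [List.countP_map]
    simpa using List.sum_map_count_dedup_filter_eq_countP (fun i => f i == v) xs
  rw [h2, List.count_eq_countP, ← h3]
  push_cast
  simp [List.map_map, Function.comp_def]

-- the two sub-dicts agree at every key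
theorem subdict_getD (ip_list : List String) (v : String) :
    (((PySem.Dict.counter ip_list).items.foldl
        (fun d p => d.insert (subnetKey p.1) (d.getD (subnetKey p.1) 0 + p.2))
        PySem.Dict.empty).getD v 0)
      = ((ip_list.foldl (fun d ip => d.insert (subnetKey ip) (d.getD (subnetKey ip) 0 + 1))
        (PySem.Dict.empty : PySem.Dict String Int)).getD v 0) := by
  have ha : ((PySem.Dict.counter ip_list).items.foldl
        (fun d p => d.insert (subnetKey p.1) (d.getD (subnetKey p.1) 0 + p.2))
        PySem.Dict.empty)
      = (((PySem.Dict.counter ip_list).items.map (fun p => (subnetKey p.1, p.2))).foldl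
          (fun d p => d.insert p.1 (d.getD p.1 0 + p.2)) PySem.Dict.empty) := by
    rw [List.foldl_map]
  have hb : (ip_list.foldl (fun d ip => d.insert (subnetKey ip) (d.getD (subnetKey ip) 0 + 1))
        (PySem.Dict.empty : PySem.Dict String Int))
      = (((ip_list.map (fun ip => (subnetKey ip, (1 : Int)))).foldl
          (fun d p => d.insert p.1 (d.getD p.1 0 + p.2)) PySem.Dict.empty)) := by
    rw [List.foldl_map]
  rw [ha, hb, getD_weighted_fold, getD_weighted_fold, PySem.Dict.items_counter]
  simp only [PySem.Dict.getD_empty, zero_add, List.filter_map, List.map_map, Function.comp_def]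
  have h1 := sum_counts_eq_count_map subnetKey ip_list v
  rw [List.count_eq_countP, List.countP_map] at h1
  simp only [Function.comp_def] at h1 ⊢
  rw [h1]
  rw [PySem.List.sum_map_const_int]
  rw [← List.countP_eq_length_filter]
  simp

theorem subdict_eq (ip_list : List String) :
    ((PySem.Dict.counter ip_list).items.foldl
        (fun d p => d.insert (subnetKey p.1) (d.getD (subnetKey p.1) 0 + p.2))
        PySem.Dict.empty)
      = (ip_list.foldl (fun d ip => d.insert (subnetKey ip) (d.getD (subnetKey ip) 0 + 1))
        (PySem.Dict.empty : PySem.Dict String Int)) := by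
  have hka := PySem.Dict.keys_foldl_insert_key (κ := String) (ν := Int)
    ((PySem.Dict.counter ip_list).items) (fun p => subnetKey p.1)
    (fun d p => d.getD (subnetKey p.1) 0 + p.2) PySem.Dict.empty
  have hkb := PySem.Dict.keys_foldl_insert_key (κ := String) (ν := Int)
    ip_list subnetKey (fun d ip => d.getD (subnetKey ip) 0 + 1) PySem.Dict.empty
  have hsame : ((PySem.Dict.counter ip_list).items).map (fun p => subnetKey p.1)
      = (PySem.Set.ofList ip_list).map subnetKey := by
    rw [PySem.Dict.items_counter]; simp [List.map_map, Function.comp_def]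
  have hkeys : ((PySem.Dict.counter ip_list).items.foldl
        (fun d p => d.insert (subnetKey p.1) (d.getD (subnetKey p.1) 0 + p.2))
        PySem.Dict.empty).keys
      = (ip_list.foldl (fun d ip => d.insert (subnetKey ip) (d.getD (subnetKey ip) 0 + 1))
        (PySem.Dict.empty : PySem.Dict String Int)).keys := by
    rw [hka, hkb, hsame]
    simp only [PySem.Dict.keys_empty, PySem.Set.update_nil_left]
    exact ofList_map_ofList subnetKey ip_list
  have hna : ((PySem.Dict.counter ip_list).items.foldl
        (fun d p => d.insert (subnetKey p.1) (d.getD (subnetKey p.1) 0 + p.2))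
        PySem.Dict.empty).keys.Nodup :=
    PySem.Dict.nodup_keys_foldl_insert_key _ _ _ _ (by simp)
  have hnb : (ip_list.foldl (fun d ip => d.insert (subnetKey ip) (d.getD (subnetKey ip) 0 + 1))
        (PySem.Dict.empty : PySem.Dict String Int)).keys.Nodup :=
    PySem.Dict.nodup_keys_foldl_insert_key _ _ _ _ (by simp)
  have hia := PySem.Dict.items_eq_map_keys _ hna (0 : Int)
  have hib := PySem.Dict.items_eq_map_keys _ hnb (0 : Int)
  apply PySem.Dict.ext
  rw [hia, hib, hkeys]
  apply List.map_congr_left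
  intro k _
  rw [subdict_getD]

-- A's first loop is the counter
theorem ipdict_eq_counter (ip_list : List String) :
    ip_list.foldl (fun d i =>
        if d.contains i then d.insert i (d.getD i 0 + 1) else d.insert i 1)
      PySem.Dict.empty = PySem.Dict.counter ip_list := by
  rw [← PySem.Dict.foldl_insert_getD_add_one_eq_counter]
  apply PySem.List.foldl_congr_mem
  intro d i _
  by_cases h : d.contains i
  · simp [h]
  · have := PySem.Dict.getD_of_not_contains d (0 : Int) (by simpa using h)
    simp [h, this]

-- ===== VERDICT (by name: the statement is the Claim_ definition above) =====
theorem find_right_subnet_spec : Claim_equal_find_right_subnet := by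
  intro ip_list _ _
  unfold Spec_find_right_subnet
  simp only [find_right_subnet, find_right_subnet_alt]
  rw [ipdict_eq_counter]
  have hA : (PySem.Dict.counter ip_list).items.foldl (fun d p =>
        if d.contains (subnetKey p.1) then d.insert (subnetKey p.1) (d.getD (subnetKey p.1) 0 + p.2)
        else d.insert (subnetKey p.1) p.2)
      PySem.Dict.empty
      = ((PySem.Dict.counter ip_list).items.foldl
        (fun d p => d.insert (subnetKey p.1) (d.getD (subnetKey p.1) 0 + p.2))
        PySem.Dict.empty) := by
    apply PySem.List.foldl_congr_mem
    intro d p _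
    by_cases h : d.contains (subnetKey p.1)
    · simp [h]
    · have := PySem.Dict.getD_of_not_contains d (0 : Int) (by simpa using h)
      simp [h, this]
  rw [hA, subdict_eq]
  set D := ip_list.foldl (fun d ip => d.insert (subnetKey ip) (d.getD (subnetKey ip) 0 + 1))
    (PySem.Dict.empty : PySem.Dict String Int) with hD
  have hnd : D.keys.Nodup := PySem.Dict.nodup_keys_foldl_insert_key _ _ _ _ (by simp)
  have hitems : D.items = D.keys.map (fun k => (k, D.getD k 0)) :=
    PySem.Dict.items_eq_map_keys _ hnd 0
  rw [hitems, max?_map_comm D.keys (fun k => (k, D.getD k 0)) (fun kv => kv.2)]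
  cases h : PySem.List.max? D.keys (fun x => D.getD x 0) with
  | none => rfl
  | some m => rfl
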